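-- pv_equiv track=rewrite | github.com/piyushd1/vs-research_crew | my_agents/src/my_agents/configuration.py | normalize_profile_key
-- ===== SOURCE A (Python) =====
-- def normalize_profile_key(value: str | None) -> str | None:
--     if value is None:
--         return None
--     normalized = value.strip().lower()
--     for needle, replacement in (("&", " and "), ("/", "_"), ("-", "_"), (" ", "_")):
--         normalized = normalized.replace(needle, replacement)
--     while "__" in normalized:
--         normalized = normalized.replace("__", "_")
--     normalized = normalized.strip("_")
--     return normalized or None
-- ===== SOURCE B (Python) =====
-- def normalize_profile_key(value):
--     if value is None:
--         return None
--     s = value.strip().lower()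
--     out = []
--     prev_us = False
--     for ch in s:
--         if ch == '&':
--             if not prev_us:
--                 out.append('_')
--             out.append('a'); out.append('n'); out.append('d'); out.append('_')
--             prev_us = True
--         elif ch in '/- _':
--             if not prev_us:
--                 out.append('_')
--             prev_us = True
--         else:
--             out.append(ch)
--             prev_us = False
--     result = ''.join(out).strip('_')
--     return result or None
-- ===== Notes on version B (the rewrite author's own statement) =====
-- stated objective: alternative
-- what changed: Replaced A's four sequential replace passes plus the repeated double-underscore collapse loop by a single left-to-right pass over the characters with a previous-char-was-underscore flag that emits each separator (slash, hyphen, space, underscore) as one collapsed underscore and expands ampersand to underscore-and-underscore online.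
import Mathlib
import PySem

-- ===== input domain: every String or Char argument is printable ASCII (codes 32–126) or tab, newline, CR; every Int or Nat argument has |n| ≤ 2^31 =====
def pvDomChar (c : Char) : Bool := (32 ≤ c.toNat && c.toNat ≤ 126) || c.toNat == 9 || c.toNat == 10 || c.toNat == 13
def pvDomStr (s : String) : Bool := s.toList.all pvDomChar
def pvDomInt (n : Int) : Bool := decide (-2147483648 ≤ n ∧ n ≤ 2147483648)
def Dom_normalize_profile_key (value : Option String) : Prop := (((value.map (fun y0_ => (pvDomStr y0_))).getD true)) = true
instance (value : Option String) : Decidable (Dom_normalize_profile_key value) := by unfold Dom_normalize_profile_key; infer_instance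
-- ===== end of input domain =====

-- B replaces A's four sequential .replace passes plus the repeated "__"-collapse loop
-- by one left-to-right pass with a 'previous char was underscore' flag (objective: alternative, a single-pass algorithm; no speed claim).

-- ===== PORT A =====
-- Python's `while "__" in normalized` loop; fuel = len + 1 only makes the recursion
-- structural (each Python iteration strictly shortens the string), no algorithm change.
def pvCollapseLoop (fuel : Nat) (s : String) : String :=
  match fuel with
  | 0 => s
  | fuel + 1 =>
    if PySem.Str.isIn "__" s then pvCollapseLoop fuel (PySem.Str.replace s "__" "_") else s

def normalize_profile_key (value : Option String) : Option String :=
  match value with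
  | none => none
  | some v =>
    let n0 := PySem.Str.lower (PySem.Str.strip v)
    let n1 := PySem.Str.replace n0 "&" " and "
    let n2 := PySem.Str.replace n1 "/" "_"
    let n3 := PySem.Str.replace n2 "-" "_"
    let n4 := PySem.Str.replace n3 " " "_"
    let n5 := pvCollapseLoop (n4.toList.length + 1) n4
    let n6 := PySem.Str.stripChars n5 "_"
    if n6 = "" then none else some n6

-- ===== PORT B =====
-- loop body of Source B: state = (emitted chars, prev_us flag)
def pvBStep (st : List Char × Bool) (ch : Char) : List Char × Bool :=
  if ch = '&' then
    (st.1 ++ (if st.2 then [] else ['_']) ++ ['a', 'n', 'd', '_'], true)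
  else if ch = '/' ∨ ch = '-' ∨ ch = ' ' ∨ ch = '_' then
    (st.1 ++ (if st.2 then [] else ['_']), true)
  else
    (st.1 ++ [ch], false)

def normalize_profile_key_alt (value : Option String) : Option String :=
  match value with
  | none => none
  | some v =>
    let s := PySem.Str.lower (PySem.Str.strip v)
    let st := s.toList.foldl pvBStep ([], false)
    let res := PySem.Str.stripChars (String.ofList st.1) "_"
    if res = "" then none else some res


-- ===== PRECONDITION & SPEC =====
def Spec_normalize_profile_key (value : Option String) (out : Option String) : Prop := out = normalize_profile_key_alt value
instance (value : Option String) (out : Option String) : Decidable (Spec_normalize_profile_key value out) := by unfold Spec_normalize_profile_key; infer_instance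

-- ===== CLAIM (what is proved, stated in full; the proofs are below) =====
def Claim_equal_normalize_profile_key : Prop := ∀ (value : Option String), Dom_normalize_profile_key value → Spec_normalize_profile_key value (normalize_profile_key value)

-- ===== LEMMAS AND PROOFS =====

def pvRep2 : List Char → List Char
  | '_' :: '_' :: t => '_' :: pvRep2 t
  | c :: t => c :: pvRep2 t
  | [] => []

theorem pvRep2_cons (a : Char) (t : List Char) (h : ¬(a = '_' ∧ t.head? = some '_')) :
    pvRep2 (a :: t) = a :: pvRep2 t := by
  rw [pvRep2.eq_def]
  split
  · rename_i t' heq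
    injection heq with h1 h2
    exact absurd ⟨h1, by rw [h2]; rfl⟩ h
  · rename_i c t' hne heq
    injection heq with h1 h2
    rw [h1, h2]
  · rename_i heq; cases heq

def pvHasDD : List Char → Bool
  | '_' :: '_' :: _ => true
  | _ :: t => pvHasDD t
  | [] => false

theorem pvHasDD_cons (a : Char) (t : List Char) (h : ¬(a = '_' ∧ t.head? = some '_')) :
    pvHasDD (a :: t) = pvHasDD t := by
  rw [pvHasDD.eq_def]
  split
  · rename_i t' heq
    injection heq with h1 h2
    exact absurd ⟨h1, by rw [h2]; rfl⟩ h
  · rename_i c t' hne heq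
    injection heq with h1 h2
    rw [h2]
  · rename_i heq; cases heq

def pvSqF : Bool → List Char → List Char × Bool
  | prev, [] => ([], prev)
  | prev, c :: t =>
    if c = '_' then
      if prev then pvSqF true t
      else ('_' :: (pvSqF true t).1, (pvSqF true t).2)
    else (c :: (pvSqF false t).1, (pvSqF false t).2)

def pvG (c : Char) : List Char :=
  if c = '&' then ['_', 'a', 'n', 'd', '_']
  else if c = '/' ∨ c = '-' ∨ c = ' ' then ['_']
  else [c]

-- replace with a single-char needle is a flatMap
theorem pv_go_single (c : Char) (r : List Char) :
    ∀ (fuel : Nat) (l acc : List Char), l.length ≤ fuel →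
      PySem.Chars.replace.go [c] r fuel l acc
        = acc.reverse ++ l.flatMap (fun x => if x = c then r else [x]) := by
  intro fuel
  induction fuel with
  | zero =>
    intro l acc h
    have : l = [] := List.eq_nil_of_length_eq_zero (Nat.le_zero.mp h)
    subst this
    simp [PySem.Chars.replace.go]
  | succ n ih =>
    intro l acc h
    cases l with
    | nil => simp [PySem.Chars.replace.go]
    | cons a t =>
      simp only [PySem.Chars.replace.go]
      by_cases hac : a = c
      · subst hac
        simp only [List.isPrefixOf, BEq.rfl, Bool.true_and, if_pos]
        rw [show [a].length = 1 from rfl, List.drop_one, List.tail_cons,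
          ih t (r.reverse ++ acc) (by simpa using Nat.lt_succ_iff.mp (by simpa using h))]
        simp
      · have hpre : [c].isPrefixOf (a :: t) = false := by
          simp [List.isPrefixOf]
          intro hc; exact absurd hc.symm hac
        rw [if_neg (by simp [hpre])]
        rw [ih t (a :: acc) (by simpa using Nat.lt_succ_iff.mp (by simpa using h))]
        simp [hac]

theorem pv_replace_single (s : List Char) (c : Char) (r : List Char) :
    PySem.Chars.replace s [c] r = s.flatMap (fun x => if x = c then r else [x]) := by
  simp only [PySem.Chars.replace, List.isEmpty_cons]
  rw [if_neg (by simp)]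
  exact pv_go_single c r s.length s [] (le_refl _)

-- one pass of "__" -> "_" is pvRep2
theorem pv_go_dd :
    ∀ (fuel : Nat) (l acc : List Char), l.length ≤ fuel →
      PySem.Chars.replace.go ['_', '_'] ['_'] fuel l acc = acc.reverse ++ pvRep2 l := by
  intro fuel
  induction fuel with
  | zero =>
    intro l acc h
    have : l = [] := List.eq_nil_of_length_eq_zero (Nat.le_zero.mp h)
    subst this
    simp [PySem.Chars.replace.go, pvRep2]
  | succ n ih =>
    intro l acc h
    cases l with
    | nil => simp [PySem.Chars.replace.go, pvRep2]
    | cons a t =>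
      simp only [PySem.Chars.replace.go]
      by_cases hdd : a = '_' ∧ t.head? = some '_'
      · obtain ⟨ha, ht⟩ := hdd
        cases t with
        | nil => simp at ht
        | cons b t' =>
          have hb : b = '_' := by simpa using ht
          subst ha; subst hb
          rw [if_pos (by simp [List.isPrefixOf])]
          rw [show (['_','_'] : List Char).length = 2 from rfl]
          simp only [List.drop_succ_cons, List.drop_zero]
          rw [ih t' _ (by simp at h ⊢; omega)]
          rw [show pvRep2 ('_' :: '_' :: t') = '_' :: pvRep2 t' from rfl]
          simp
      · have hpre : ['_', '_'].isPrefixOf (a :: t) = false := by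
          cases t with
          | nil => simp [List.isPrefixOf]
          | cons b t' =>
            simp [List.isPrefixOf]
            intro ha hb; exact absurd ⟨ha.symm, by simp [← hb]⟩ hdd
        rw [if_neg (by simp [hpre])]
        rw [ih t (a :: acc) (by simpa using Nat.lt_succ_iff.mp (by simpa using h))]
        rw [pvRep2_cons a t hdd]
        simp

theorem pv_replace_dd (s : List Char) :
    PySem.Chars.replace s ['_', '_'] ['_'] = pvRep2 s := by
  simp only [PySem.Chars.replace, List.isEmpty_cons]
  rw [if_neg (by simp)]
  exact pv_go_dd s.length s [] (le_refl _)

-- "__" in s  <->  pvHasDD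
theorem pv_isIn_dd (s : List Char) : PySem.Chars.isIn ['_', '_'] s = pvHasDD s := by
  have hinf : (['_', '_'] <:+: s) ↔ pvHasDD s = true := by
    induction s with
    | nil => simp [pvHasDD]
    | cons a t ih =>
      rw [List.infix_cons_iff]
      by_cases hdd : a = '_' ∧ t.head? = some '_'
      · obtain ⟨ha, ht⟩ := hdd
        cases t with
        | nil => simp at ht
        | cons b t' =>
          have hb : b = '_' := by simpa using ht
          subst ha; subst hb
          exact iff_of_true (.inl ⟨t', rfl⟩) rfl
      · rw [pvHasDD_cons a t hdd]
        rw [← ih]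
        constructor
        · rintro (hp | hi)
          · exfalso
            obtain ⟨u, hu⟩ := hp
            cases t with
            | nil => simp at hu
            | cons b t' =>
              injection hu with h1 h2
              injection h2 with h3 h4
              exact hdd ⟨h1.symm, by rw [List.head?_cons, ← h3]⟩
          · exact hi
        · exact .inr
  rcases h : pvHasDD s with _ | _
  · rw [PySem.Chars.isIn_eq_false_iff]
    rw [hinf, h]; simp
  · rw [(PySem.Chars.isIn_iff_infix _ _).mpr (hinf.mpr h)]

theorem pvRep2_length_le (l : List Char) : (pvRep2 l).length ≤ l.length := by
  induction l using pvRep2.induct with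
  | case1 t ih => rw [show pvRep2 ('_' :: '_' :: t) = '_' :: pvRep2 t from rfl]; simp; omega
  | case2 c t hne ih =>
    rw [pvRep2_cons c t (by
      rintro ⟨h1, h2⟩
      cases t with
      | nil => simp at h2
      | cons b t' =>
        exact hne t' h1 (by rw [List.head?_cons] at h2; injection h2 with h3; rw [h3]) )]
    simpa using ih
  | case3 => simp [pvRep2]

theorem pvRep2_length_lt (l : List Char) (h : pvHasDD l = true) :
    (pvRep2 l).length < l.length := by
  induction l using pvRep2.induct with
  | case1 t ih =>
    rw [show pvRep2 ('_' :: '_' :: t) = '_' :: pvRep2 t from rfl]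
    have := pvRep2_length_le t
    simp; omega
  | case2 c t hne ih =>
    have hcons : ¬(c = '_' ∧ t.head? = some '_') := by
      rintro ⟨h1, h2⟩
      cases t with
      | nil => simp at h2
      | cons b t' =>
        exact hne t' h1 (by rw [List.head?_cons] at h2; injection h2 with h3; rw [h3])
    rw [pvRep2_cons c t hcons]
    rw [pvHasDD_cons c t hcons] at h
    simpa using ih h
  | case3 => simp [pvHasDD] at h

theorem pvSqF_rep2 (l : List Char) : ∀ prev, pvSqF prev (pvRep2 l) = pvSqF prev l := by
  induction l using pvRep2.induct with
  | case1 t ih =>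
    intro prev
    rw [show pvRep2 ('_' :: '_' :: t) = '_' :: pvRep2 t from rfl]
    cases prev <;> simp [pvSqF, ih]
  | case2 c t hne ih =>
    intro prev
    have hcons : ¬(c = '_' ∧ t.head? = some '_') := by
      rintro ⟨h1, h2⟩
      cases t with
      | nil => simp at h2
      | cons b t' =>
        exact hne t' h1 (by rw [List.head?_cons] at h2; injection h2 with h3; rw [h3])
    rw [pvRep2_cons c t hcons]
    by_cases hc : c = '_' <;> cases prev <;> simp [pvSqF, hc, ih]
  | case3 => intro prev; simp [pvRep2]

theorem pvSqF_noDD (l : List Char) (h : pvHasDD l = false) :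
    ∀ prev, (prev = true → ¬ l.head? = some '_') → (pvSqF prev l).1 = l := by
  induction l with
  | nil => intro prev _; simp [pvSqF]
  | cons a t ih =>
    intro prev hprev
    by_cases hdd : a = '_' ∧ t.head? = some '_'
    · exfalso
      obtain ⟨ha, ht⟩ := hdd
      cases t with
      | nil => simp at ht
      | cons b t' =>
        have hb : b = '_' := by simpa using ht
        subst ha; subst hb
        simp [pvHasDD] at h
    · rw [pvHasDD_cons a t hdd] at h
      by_cases ha : a = '_'
      · have hp : prev = false := by
          rcases prev with _ | _
          · rfl
          · exact absurd (by simp [ha]) (hprev rfl)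
        subst hp; subst ha
        have := ih h true (fun _ hh => hdd ⟨rfl, hh⟩)
        simp [pvSqF, this]
      · simp only [pvSqF, if_neg ha]
        have := ih h false (by simp)
        simp [this]

theorem pvSqF_append (l1 l2 : List Char) : ∀ prev,
    pvSqF prev (l1 ++ l2)
      = ((pvSqF prev l1).1 ++ (pvSqF (pvSqF prev l1).2 l2).1, (pvSqF (pvSqF prev l1).2 l2).2) := by
  induction l1 with
  | nil => intro prev; simp [pvSqF]
  | cons a t ih =>
    intro prev
    by_cases ha : a = '_' <;> cases prev <;> simp [pvSqF, ha, ih]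

theorem pvStep_chunk (acc : List Char) (prev : Bool) (c : Char) :
    pvBStep (acc, prev) c = (acc ++ (pvSqF prev (pvG c)).1, (pvSqF prev (pvG c)).2) := by
  by_cases h1 : c = '&'
  · subst h1; cases prev <;> simp [pvBStep, pvG, pvSqF]
  · by_cases h2 : c = '/' ∨ c = '-' ∨ c = ' ' ∨ c = '_'
    · have hg : pvG c = ['_'] := by
        rcases h2 with h | h | h | h <;> subst h <;> simp [pvG]
      cases prev <;> simp [pvBStep, pvSqF, h1, h2, hg]
    · have hc : ¬ c = '_' := fun h => h2 (.inr (.inr (.inr h)))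
      have h2' : ¬ (c = '/' ∨ c = '-' ∨ c = ' ') := by tauto
      cases prev <;> simp [pvBStep, pvG, pvSqF, h1, hc, h2']

theorem pvFoldl_sq (s : List Char) : ∀ (acc : List Char) (prev : Bool),
    s.foldl pvBStep (acc, prev)
      = (acc ++ (pvSqF prev (s.flatMap pvG)).1, (pvSqF prev (s.flatMap pvG)).2) := by
  induction s with
  | nil => intro acc prev; simp [pvSqF]
  | cons c t ih =>
    intro acc prev
    rw [List.foldl_cons, pvStep_chunk, ih, List.flatMap_cons, pvSqF_append]
    simp

theorem pv_chain (L : List Char) :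
    ((((L.flatMap (fun x => if x = '&' then [' ', 'a', 'n', 'd', ' '] else [x])).flatMap
        (fun x => if x = '/' then ['_'] else [x])).flatMap
        (fun x => if x = '-' then ['_'] else [x])).flatMap
        (fun x => if x = ' ' then ['_'] else [x])) = L.flatMap pvG := by
  simp only [List.flatMap_assoc]
  congr 1
  funext c
  by_cases h1 : c = '&'
  · subst h1; rfl
  · by_cases h2 : c = '/'
    · subst h2; rfl
    · by_cases h3 : c = '-'
      · subst h3; rfl
      · by_cases h4 : c = ' '
        · subst h4; rfl
        · simp [pvG, h1, h2, h3, h4]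

theorem pv_loop (fuel : Nat) : ∀ s : String, s.toList.length < fuel →
    (pvCollapseLoop fuel s).toList = (pvSqF false s.toList).1 := by
  induction fuel with
  | zero => intro s h; omega
  | succ n ih =>
    intro s h
    rw [pvCollapseLoop]
    have hdd : PySem.Str.isIn "__" s = pvHasDD s.toList := by
      rw [show PySem.Str.isIn "__" s = PySem.Chars.isIn ['_', '_'] s.toList from by simp,
        pv_isIn_dd]
    rw [hdd]
    rcases hc : pvHasDD s.toList with _ | _
    · rw [if_neg (by simp)]
      exact (pvSqF_noDD s.toList hc false (by simp)).symm
    · rw [if_pos rfl]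
      have hrep : (PySem.Str.replace s "__" "_").toList = pvRep2 s.toList := by
        rw [show (PySem.Str.replace s "__" "_").toList
              = PySem.Chars.replace s.toList ['_', '_'] ['_'] from by simp,
          pv_replace_dd]
      rw [ih _ (by rw [hrep]; have := pvRep2_length_lt s.toList hc; omega)]
      rw [hrep, pvSqF_rep2]

theorem pv_main : ∀ (value : Option String),
    normalize_profile_key value = normalize_profile_key_alt value := by
  intro value
  cases value with
  | none => rfl
  | some v =>
    simp only [normalize_profile_key, normalize_profile_key_alt]
    have bridge : ∀ (t a b : String), (PySem.Str.replace t a b).toList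
        = PySem.Chars.replace t.toList a.toList b.toList := fun _ _ _ => by simp
    have h4 : (PySem.Str.replace (PySem.Str.replace (PySem.Str.replace
        (PySem.Str.replace (PySem.Str.lower (PySem.Str.strip v)) "&" " and ")
        "/" "_") "-" "_") " " "_").toList
        = ((PySem.Str.lower (PySem.Str.strip v)).toList).flatMap pvG := by
      rw [bridge, bridge, bridge, bridge]
      rw [show ("&" : String).toList = ['&'] from rfl,
        show (" and " : String).toList = [' ', 'a', 'n', 'd', ' '] from rfl,
        show ("/" : String).toList = ['/'] from rfl,
        show ("-" : String).toList = ['-'] from rfl,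
        show (" " : String).toList = [' '] from rfl,
        show ("_" : String).toList = ['_'] from rfl]
      rw [pv_replace_single, pv_replace_single, pv_replace_single, pv_replace_single]
      exact pv_chain _
    have h5 := pv_loop ((PySem.Str.replace (PySem.Str.replace (PySem.Str.replace
        (PySem.Str.replace (PySem.Str.lower (PySem.Str.strip v)) "&" " and ")
        "/" "_") "-" "_") " " "_").toList.length + 1)
        (PySem.Str.replace (PySem.Str.replace (PySem.Str.replace
        (PySem.Str.replace (PySem.Str.lower (PySem.Str.strip v)) "&" " and ")
        "/" "_") "-" "_") " " "_") (by omega)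
    have hst := pvFoldl_sq ((PySem.Str.lower (PySem.Str.strip v)).toList) [] false
    have hkey : pvCollapseLoop ((PySem.Str.replace (PySem.Str.replace (PySem.Str.replace
        (PySem.Str.replace (PySem.Str.lower (PySem.Str.strip v)) "&" " and ")
        "/" "_") "-" "_") " " "_").toList.length + 1)
        (PySem.Str.replace (PySem.Str.replace (PySem.Str.replace
        (PySem.Str.replace (PySem.Str.lower (PySem.Str.strip v)) "&" " and ")
        "/" "_") "-" "_") " " "_")
        = String.ofList ((PySem.Str.lower (PySem.Str.strip v)).toList.foldl pvBStep ([], false)).1 := by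
      rw [hst]
      conv_lhs => rw [← (String.ofList_toList (s := pvCollapseLoop _ _))]
      rw [h5, h4]
      simp
    rw [hkey]

-- ===== VERDICT (by name: the statement is the Claim_ definition above) =====
theorem normalize_profile_key_spec : Claim_equal_normalize_profile_key := by
  intro value _
  exact pv_main value
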